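-- pv_equiv track=rewrite | github.com/abhisha1991/LeetCodePractice | Python/SkyLineProblem.py | ensureSingleEntry
-- ===== SOURCE A (Python) =====
-- from collections import defaultdict, OrderedDict
--
-- def ensureSingleEntry(skyline):
--     # notice we need an ordered dict because we need to maintain order (sorted by x axis value) in the answer
--     dic = OrderedDict()
--     output = []
--     for x in skyline:
--         if x[0] in dic.keys():
--             dic[x[0]].append(x[1])
--         else:
--             dic[x[0]] = [x[1]]
--
--     for k,v in dic.items():
--         if len(v) > 1:
--             output.append([k, min(v)])
--         else:
--             output.append([k, v[0]])
--
--     return output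
-- ===== SOURCE B (Python) =====
-- def ensureSingleEntry(skyline):
--     # repeated extraction: peel off the first remaining x-group per round,
--     # tracking its minimum height while collecting the other points for later rounds
--     output = []
--     rest = skyline
--     while rest:
--         k = rest[0][0]
--         m = rest[0][1]
--         nxt = []
--         for x in rest[1:]:
--             if x[0] == k:
--                 m = min(m, x[1])
--             else:
--                 nxt.append(x)
--         output.append([k, m])
--         rest = nxt
--     return output
-- ===== Notes on version B (the rewrite author's own statement) =====
-- stated objective: alternative
-- what changed: B uses no dictionary at all: it repeatedly extracts the first remaining x-group, computing that group's minimum height in one scan while collecting the points of other x-values for the next round, instead of A's dict that accumulates a height list per x followed by a second reduction pass.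
import Mathlib
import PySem

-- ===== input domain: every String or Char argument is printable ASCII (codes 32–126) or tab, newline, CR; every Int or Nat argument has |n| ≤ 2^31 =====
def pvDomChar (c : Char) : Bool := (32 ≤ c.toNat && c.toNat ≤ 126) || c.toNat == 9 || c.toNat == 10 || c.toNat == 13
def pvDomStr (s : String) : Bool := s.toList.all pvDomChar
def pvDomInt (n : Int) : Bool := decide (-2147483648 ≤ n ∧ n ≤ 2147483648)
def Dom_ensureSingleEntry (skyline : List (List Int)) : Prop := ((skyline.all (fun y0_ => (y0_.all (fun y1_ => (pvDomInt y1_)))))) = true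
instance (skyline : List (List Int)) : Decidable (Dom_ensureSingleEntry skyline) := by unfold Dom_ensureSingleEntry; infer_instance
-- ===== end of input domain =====

-- B drops A's dict-plus-second-reduction-pass entirely: it repeatedly extracts the first
-- remaining x-group, taking a running minimum while collecting the other points for the
-- next round (objective: alternative; not faster for many distinct x-values).

-- ===== PORT A =====
-- x[0] / x[1] ported as pyGet?; none = IndexError, excluded by Pre_ (.getD 0 is never reached inside Pre_).
def ensureSingleEntry (skyline : List (List Int)) : List (List Int) :=
  let dic : PySem.Dict Int (List Int) :=
    skyline.foldl (fun dic x =>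
      let k := (PySem.List.pyGet? x 0).getD 0
      let h := (PySem.List.pyGet? x 1).getD 0
      match dic.get? k with
      | some v => dic.insert k (v ++ [h])   -- dic[x[0]].append(x[1]): in-place append keeps the key's position
      | none   => dic.insert k [h]) PySem.Dict.empty
  dic.items.foldl (fun output p =>
      if p.2.length > 1 then
        output ++ [[p.1, (PySem.List.min? p.2 (fun y => y)).getD 0]]   -- min(v); v nonempty whenever this is reached
      else
        output ++ [[p.1, (PySem.List.pyGet? p.2 0).getD 0]]) []

-- ===== PORT B =====
-- inner 'for x in rest[1:]' loop of Source B: threads (m, nxt) through the tail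
def pvScanB (tl : List (List Int)) (k : Int) (s : Int × List (List Int)) : Int × List (List Int) :=
  tl.foldl (fun s x =>
    if (PySem.List.pyGet? x 0).getD 0 == k then
      (min s.1 ((PySem.List.pyGet? x 1).getD 0), s.2)
    else
      (s.1, s.2 ++ [x])) s

-- the scanned-off remainder never grows beyond the tail (termination of the while loop)
theorem pvScanB_len (tl : List (List Int)) (k : Int) (s : Int × List (List Int)) :
    (pvScanB tl k s).2.length ≤ s.2.length + tl.length := by
  induction tl generalizing s with
  | nil => simp [pvScanB]
  | cons x t ih =>
    simp only [pvScanB, List.foldl_cons] at *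
    split
    · exact le_trans (ih _) (by simp)
    · exact le_trans (ih _) (by simp; omega)

-- the while loop of Source B (output accumulator kept; rest shrinks each round)
def ensureSingleEntry_altGo (output : List (List Int)) (rest : List (List Int)) :
    List (List Int) :=
  match rest with
  | [] => output
  | x0 :: tl =>
    let k := (PySem.List.pyGet? x0 0).getD 0
    let s := pvScanB tl k ((PySem.List.pyGet? x0 1).getD 0, [])
    ensureSingleEntry_altGo (output ++ [[k, s.1]]) s.2
termination_by rest.length
decreasing_by
  have h := pvScanB_len tl ((PySem.List.pyGet? x0 0).getD 0)
      (((PySem.List.pyGet? x0 1).getD 0), [])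
  simp only [List.length_nil, Nat.zero_add] at h
  simp only [List.length_cons]
  omega

def ensureSingleEntry_alt (skyline : List (List Int)) : List (List Int) :=
  ensureSingleEntry_altGo [] skyline

-- ===== PRECONDITION & SPEC =====
-- A raises IndexError on x[0] / x[1] when an element has fewer than two entries; excluded here.
def Pre_ensureSingleEntry (skyline : List (List Int)) : Prop := ∀ x ∈ skyline, 2 ≤ x.length
instance (skyline : List (List Int)) : Decidable (Pre_ensureSingleEntry skyline) := by unfold Pre_ensureSingleEntry; infer_instance
def pvWitness_ensureSingleEntry : List (List Int) := [[1, 3], [1, 2], [2, 5]]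

def Spec_ensureSingleEntry (skyline : List (List Int)) (out : List (List Int)) : Prop := out = ensureSingleEntry_alt skyline
instance (skyline : List (List Int)) (out : List (List Int)) : Decidable (Spec_ensureSingleEntry skyline out) := by unfold Spec_ensureSingleEntry; infer_instance

-- ===== CLAIM (what is proved, stated in full; the proofs are below) =====
def Claim_equal_ensureSingleEntry : Prop := ∀ (skyline : List (List Int)), Dom_ensureSingleEntry skyline → Pre_ensureSingleEntry skyline → Spec_ensureSingleEntry skyline (ensureSingleEntry skyline)

-- ===== LEMMAS AND PROOFS =====

-- shorthands for the x[0] / x[1] projections both ports use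
abbrev pvKey (x : List Int) : Int := (PySem.List.pyGet? x 0).getD 0
abbrev pvVal (x : List Int) : Int := (PySem.List.pyGet? x 1).getD 0
-- running minimum of a nonempty list (0 on [])
def pvMinL (l : List Int) : Int :=
  match l with
  | [] => 0
  | a :: t => t.foldl min a

-- the common normal form both ports are reduced to: one row per first occurrence of a key,
-- holding the minimum of all values carried by that key
def pvSpecRow (ps : List (Int × Int)) (c : Int) : List Int :=
  [c, pvMinL ((ps.filter (fun p => p.1 == c)).map Prod.snd)]

def pvNormal (ps : List (Int × Int)) : List (List Int) :=
  (PySem.Set.ofList (ps.map Prod.fst)).map (pvSpecRow ps)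

-- ---- facts about Set.ofList's fold needed to peel its first element ----

theorem pvFoldlAdd_cons (a : Int) (s l : List Int) (h : ∀ x ∈ l, x ≠ a) :
    List.foldl PySem.Set.add (a :: s) l = a :: List.foldl PySem.Set.add s l := by
  induction l generalizing s with
  | nil => rfl
  | cons x t ih =>
    have hxa : x ≠ a := h x (by simp)
    simp only [List.foldl_cons]
    have hadd : PySem.Set.add (a :: s) x = a :: PySem.Set.add s x := by
      have hc : (a :: s).contains x = s.contains x := by
        simp [hxa]
      simp only [PySem.Set.add, PySem.Set.contains, hc]
      split <;> rfl
    rw [hadd]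
    exact ih (PySem.Set.add s x) (fun y hy => h y (by simp [hy]))

theorem pvFoldlAdd_filter (a : Int) (s l : List Int) (ha : a ∈ s) :
    List.foldl PySem.Set.add s l
      = List.foldl PySem.Set.add s (l.filter (fun x => !(x == a))) := by
  induction l generalizing s with
  | nil => rfl
  | cons x t ih =>
    simp only [List.foldl_cons, List.filter_cons]
    by_cases hx : x = a
    · subst hx
      have hc : s.contains x = true := List.contains_iff_mem.mpr ha
      simp only [BEq.rfl, Bool.not_true, Bool.false_eq_true, if_neg, not_false_iff]
      have : PySem.Set.add s x = s := by simp [PySem.Set.add, PySem.Set.contains, ha]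
      rw [this]; exact ih s ha
    · have hbe : (!(x == a)) = true := by simp [hx]
      rw [hbe, if_pos rfl]
      simp only [List.foldl_cons]
      exact ih (PySem.Set.add s x) (by simp [PySem.Set.mem_add, ha])

theorem pvOfList_cons (a : Int) (l : List Int) :
    PySem.Set.ofList (a :: l)
      = a :: PySem.Set.ofList (l.filter (fun x => !(x == a))) := by
  simp only [PySem.Set.ofList, List.foldl_cons]
  have h0 : PySem.Set.add PySem.Set.empty a = [a] := rfl
  rw [h0, pvFoldlAdd_filter a [a] l (by simp)]
  exact pvFoldlAdd_cons a [] _ (fun x hx => by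
    have := List.of_mem_filter hx
    simpa using this)

-- filtering by a key c survives first removing a different key k
theorem pvFilter_filter_ne (t : List (Int × Int)) (k c : Int) (hck : c ≠ k) :
    (t.filter (fun p => !(p.1 == k))).filter (fun p => p.1 == c)
      = t.filter (fun p => p.1 == c) := by
  rw [List.filter_filter]
  apply List.filter_congr
  intro p _
  by_cases hp : p.1 = c
  · simp [hp, hck]
  · simp [hp]

-- ---- B: the while loop computes pvNormal of the (key, value) stream ----

-- one round of the scan, split into its two components
theorem pvScanB_spec (tl : List (List Int)) (k : Int) (m : Int) (acc : List (List Int)) :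
    pvScanB tl k (m, acc)
      = (((tl.filter (fun x => pvKey x == k)).map pvVal).foldl min m,
         acc ++ tl.filter (fun x => !(pvKey x == k))) := by
  induction tl generalizing m acc with
  | nil => simp [pvScanB]
  | cons x t ih =>
    simp only [pvKey, pvScanB, List.foldl_cons, List.filter_cons] at ih ⊢
    by_cases hx : (((PySem.List.pyGet? x 0).getD 0 : Int) == k) = true
    · simp only [hx, if_true, Bool.not_true, Bool.false_eq_true, if_false,
        List.map_cons, List.foldl_cons]
      exact ih _ _
    · have hx' : (((PySem.List.pyGet? x 0).getD 0 : Int) == k) = false :=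
        Bool.not_eq_true _ ▸ eq_false_of_ne_true hx
      simp only [hx', Bool.not_false, if_true, Bool.false_eq_true, if_false]
      rw [ih]
      simp [List.append_assoc]

theorem pvGo_normal (rest : List (List Int)) (output : List (List Int)) :
    ensureSingleEntry_altGo output rest
      = output ++ pvNormal (rest.map (fun x => (pvKey x, pvVal x))) := by
  induction hn : rest.length using Nat.strong_induction_on generalizing rest output with
  | _ n ih =>
    cases rest with
    | nil => simp [ensureSingleEntry_altGo, pvNormal, PySem.Set.ofList, PySem.Set.empty]
    | cons x0 tl =>
      rw [ensureSingleEntry_altGo]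
      rw [pvScanB_spec tl (pvKey x0) (pvVal x0) []]
      simp only [List.nil_append]
      have hlen : (tl.filter (fun x => !(pvKey x == pvKey x0))).length < n := by
        subst hn
        exact lt_of_le_of_lt (List.length_filter_le _ _) (by simp)
      rw [ih _ hlen _ _ rfl]
      rw [List.append_assoc]
      congr 1
      -- the remaining-normal-form equals the tail of pvNormal of the whole stream
      simp only [pvNormal, List.map_cons, pvOfList_cons]
      rw [List.singleton_append]
      congr 1
      · -- head row
        simp only [pvSpecRow, List.filter_cons, pvMinL]
        simp only [BEq.rfl, if_pos, List.map_cons]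
        congr 2
        rw [List.filter_map, List.map_map]
        rfl
      · -- tail rows: keys agree, and each surviving key filters identically
        have hmf : (tl.map (fun x => (pvKey x, pvVal x))).filter (fun p => !(p.1 == pvKey x0))
            = (tl.filter (fun x => !(pvKey x == pvKey x0))).map (fun x => (pvKey x, pvVal x)) := by
          rw [List.filter_map]
          rfl
        have hkeys : ((tl.map (fun x => (pvKey x, pvVal x))).map Prod.fst).filter
              (fun c => !(c == pvKey x0))
            = ((tl.filter (fun x => !(pvKey x == pvKey x0))).map
                (fun x => (pvKey x, pvVal x))).map Prod.fst := by
          rw [List.map_map, List.filter_map, List.map_map]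
          rfl
        rw [← hkeys]
        apply List.map_congr_left
        intro c hc
        have hcmem : c ∈ ((tl.map (fun x => (pvKey x, pvVal x))).map Prod.fst).filter
            (fun c => !(c == pvKey x0)) := (PySem.Set.mem_ofList _ c).mp hc
        have hck : c ≠ pvKey x0 := by
          have := List.of_mem_filter hcmem
          simpa using this
        simp only [pvSpecRow]
        congr 3
        rw [← hmf, pvFilter_filter_ne _ _ _ hck,
            List.filter_cons_of_neg (by simp [Ne.symm hck])]

-- ---- A: reductions reused from the dict characterization ----

-- A's grouping loop is the modify-append fold
theorem pvA_fold_eq (skyline : List (List Int)) (d : PySem.Dict Int (List Int)) :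
    skyline.foldl (fun dic x =>
      let k := (PySem.List.pyGet? x 0).getD 0
      let h := (PySem.List.pyGet? x 1).getD 0
      match dic.get? k with
      | some v => dic.insert k (v ++ [h])
      | none   => dic.insert k [h]) d
    = (skyline.map (fun x => (pvKey x, pvVal x))).foldl
        (fun dic p => dic.modify p.1 [] (· ++ [p.2])) d := by
  rw [List.foldl_map]
  apply PySem.List.foldl_congr_mem
  intro acc x _
  simp only [pvKey, pvVal, PySem.Dict.modify]
  cases h : acc.get? ((PySem.List.pyGet? x 0).getD 0) with
  | some v => rw [PySem.Dict.getD_of_get?_eq_some acc [] h]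
  | none => rw [PySem.Dict.getD_of_get?_eq_none acc [] h]; rfl

-- A's per-key reduction equals the running minimum
theorem pvA_reduce (l : List Int) (hl : l ≠ []) :
    (if l.length > 1 then (PySem.List.min? l (fun y => y)).getD 0
     else (PySem.List.pyGet? l 0).getD 0) = pvMinL l := by
  cases l with
  | nil => exact absurd rfl hl
  | cons a t =>
    cases t with
    | nil => simp [pvMinL, PySem.List.pyGet?, PySem.List.pyIdx?]
    | cons b t' =>
      rw [if_pos (by simp), PySem.List.min?_id_cons]
      rfl

theorem pvA_normal (skyline : List (List Int)) :
    ensureSingleEntry skyline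
      = pvNormal (skyline.map (fun x => (pvKey x, pvVal x))) := by
  simp only [ensureSingleEntry]
  rw [pvA_fold_eq]
  set ps := skyline.map (fun x => (pvKey x, pvVal x)) with hps
  set dA := ps.foldl (fun dic p => dic.modify p.1 [] (· ++ [p.2])) PySem.Dict.empty with hdA
  have hkA : dA.keys = PySem.Set.ofList (ps.map (fun p => p.1)) := by
    rw [hdA, PySem.Dict.keys_foldl_modify_key ps (fun p => p.1) [] (fun _ p => (· ++ [p.2]))]
    simp [PySem.Dict.keys_empty]
    rfl
  have hndA : dA.keys.Nodup := by
    rw [hdA]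
    exact PySem.Dict.nodup_keys_foldl_modify_key ps (fun p => p.1) [] (fun _ p => (· ++ [p.2]))
      PySem.Dict.empty (by simp [PySem.Dict.keys_empty])
  rw [PySem.Dict.items_eq_map_keys dA hndA []]
  have hfoldA : ∀ (l : List (Int × List Int)),
      l.foldl (fun output p =>
        if p.2.length > 1 then
          output ++ [[p.1, (PySem.List.min? p.2 (fun y => y)).getD 0]]
        else
          output ++ [[p.1, (PySem.List.pyGet? p.2 0).getD 0]]) []
      = l.map (fun p => [p.1, if p.2.length > 1 then (PySem.List.min? p.2 (fun y => y)).getD 0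
                              else (PySem.List.pyGet? p.2 0).getD 0]) := by
    intro l
    have := PySem.List.foldl_append_singleton_eq_map
      (fun p : Int × List Int => [p.1, if p.2.length > 1 then (PySem.List.min? p.2 (fun y => y)).getD 0
                                       else (PySem.List.pyGet? p.2 0).getD 0]) l []
    rw [List.nil_append] at this
    rw [← this]
    apply PySem.List.foldl_congr_mem
    intro acc p _
    by_cases hp : p.2.length > 1 <;> simp [hp]
  rw [hfoldA, List.map_map, pvNormal, hkA]
  apply List.map_congr_left
  intro c hc
  have hcmem : c ∈ ps.map (fun p => p.1) := (PySem.Set.mem_ofList _ c).mp hc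
  have hfne : (ps.filter (fun p => p.1 == c)).map (fun p => p.2) ≠ [] := by
    obtain ⟨p, hpmem, hpc⟩ := List.mem_map.mp hcmem
    have : p ∈ ps.filter (fun p => p.1 == c) := List.mem_filter.mpr ⟨hpmem, by simp [hpc]⟩
    intro h
    simp only [List.map_eq_nil_iff] at h
    rw [h] at this
    exact List.not_mem_nil this
  have hgA : dA.getD c [] = (ps.filter (fun p => p.1 == c)).map (fun p => p.2) := by
    rw [hdA]
    have := PySem.Dict.getD_foldl_modify_append ps PySem.Dict.empty c
    simpa using this
  simp only [Function.comp, pvSpecRow]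
  rw [hgA, pvA_reduce _ hfne]

theorem ensureSingleEntry_eq_alt (skyline : List (List Int)) :
    ensureSingleEntry skyline = ensureSingleEntry_alt skyline := by
  rw [pvA_normal, ensureSingleEntry_alt, pvGo_normal, List.nil_append]

-- ===== VERDICT (by name: the statement is the Claim_ definition above) =====
theorem ensureSingleEntry_spec : Claim_equal_ensureSingleEntry := by
  intro skyline _ _
  exact ensureSingleEntry_eq_alt skyline
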